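-- pv_equiv track=rewrite | github.com/GoogleCloudPlatform/document-ai-samples | incubator-tools/advance_table_line_enhancement/tool_helper_functions.py | get_column_name_type_using_xcoord
-- ===== SOURCE A (Python) =====
-- from typing import DefaultDict, Dict, List, MutableSequence, Tuple, Union
--
-- def get_column_name_type_using_xcoord(
--     value: int, processed_map: Dict[str, List[int]]
-- ) -> Tuple[Union[str, None], Union[List[str], None]]:
--     """
--     This method returns the name of the column by its horizontal location
--     It would need to be set on a per-carrier basis and adjusted if the reports
--     change. Because some cell values span columns we can't auto-detect columns
--     by drawing vertical lines down the page in places where they don't intersect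
--     with text.
--     """
--
--     for col, threshold in dict(
--         sorted(processed_map.items(), key=lambda item: item[1])
--     ).items():
--         if threshold[0] <= value <= threshold[1]:
--             col_string = col.split("_")
--             if "DNSH" in col_string or "safeguards" in col_string:
--                 return col, ["Y", "N", "N/A", "S", "n/a"]
--             if "SCC" in col_string or "proportion" in col_string:
--                 return col, ["%"]
--             if "business" in col_string:
--                 return col, ["number"]
--             if "code" in col_string:
--                 return col, ["code"]
--             return col, None
--     return None, None
-- ===== SOURCE B (Python) =====
-- def get_column_name_type_using_xcoord(value, processed_map):
--     # Single pass: keep the matching entry with the lexicographically smallest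
--     # threshold list (first occurrence wins on ties) instead of sorting everything.
--     best = None  # (col, threshold) of the best match so far
--     for col, threshold in processed_map.items():
--         if threshold[0] <= value <= threshold[1]:
--             if best is None or threshold < best[1]:
--                 best = (col, threshold)
--     if best is None:
--         return None, None
--     col = best[0]
--     parts = set(col.split("_"))
--     for keys, col_type in (
--         ({"DNSH", "safeguards"}, ["Y", "N", "N/A", "S", "n/a"]),
--         ({"SCC", "proportion"}, ["%"]),
--         ({"business"}, ["number"]),
--         ({"code"}, ["code"]),
--     ):
--         if keys & parts:
--             return col, col_type
--     return col, None
-- ===== Notes on version B (the rewrite author's own statement) =====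
-- stated objective: faster
-- what changed: B replaces A's full sort of all entries (then scan for the first containing interval) by one linear pass that keeps the matching entry with the lexicographically smallest threshold list (first occurrence on ties), and classifies the column via a rule table over the set of name parts.
-- outside the precondition, e.g. on get_column_name_type_using_xcoord(0, {'a': [-2, 5], 'b': [-1]}): A returns ('a', None), B raises IndexError
import Mathlib
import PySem

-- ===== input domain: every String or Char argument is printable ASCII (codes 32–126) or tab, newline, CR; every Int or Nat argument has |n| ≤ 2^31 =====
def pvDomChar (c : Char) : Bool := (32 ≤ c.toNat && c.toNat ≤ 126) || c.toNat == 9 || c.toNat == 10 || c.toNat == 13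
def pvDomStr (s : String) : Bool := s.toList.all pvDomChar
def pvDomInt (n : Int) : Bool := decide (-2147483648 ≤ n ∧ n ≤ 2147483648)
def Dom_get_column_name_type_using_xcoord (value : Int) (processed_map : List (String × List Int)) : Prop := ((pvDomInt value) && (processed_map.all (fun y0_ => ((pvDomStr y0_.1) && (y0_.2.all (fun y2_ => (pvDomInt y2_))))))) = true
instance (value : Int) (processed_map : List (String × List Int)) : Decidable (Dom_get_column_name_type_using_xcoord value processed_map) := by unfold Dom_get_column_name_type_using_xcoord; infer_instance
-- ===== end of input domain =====

-- B replaces A's sort-then-scan by one linear pass keeping the matching entry with the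
-- lexicographically smallest threshold list; equal return values proved on Pre_ below.

-- ===== PORT A =====
-- tail of A's loop body: classification of a matched column name
def pvClassifyA (col : String) : Option String × Option (List String) :=
  let col_string := (PySem.Str.split? col "_").getD []  -- sep "_" ≠ "", so split? is always some
  if col_string.contains "DNSH" || col_string.contains "safeguards" then
    (some col, some ["Y", "N", "N/A", "S", "n/a"])
  else if col_string.contains "SCC" || col_string.contains "proportion" then
    (some col, some ["%"])
  else if col_string.contains "business" then (some col, some ["number"])
  else if col_string.contains "code" then (some col, some ["code"])
  else (some col, none)

-- A's 'for col, threshold in …' loop, with Python's short-circuit of 'threshold[0] <= value <= threshold[1]'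
def pvLoopA (value : Int) : List (String × List Int) → Option String × Option (List String)
  | [] => (none, none)
  | (col, threshold) :: rest =>
    match PySem.List.pyGet? threshold 0 with
    | none => (none, none)  -- threshold[0] raises IndexError in Python: outside Pre_
    | some t0 =>
      if t0 ≤ value then
        match PySem.List.pyGet? threshold 1 with
        | none => (none, none)  -- threshold[1] raises IndexError in Python: outside Pre_
        | some t1 =>
          if value ≤ t1 then pvClassifyA col else pvLoopA value rest
      else pvLoopA value rest

def get_column_name_type_using_xcoord (value : Int) (processed_map : List (String × List Int)) : Option String × Option (List String) :=
  pvLoopA value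
    (PySem.Dict.ofList
      (PySem.List.sorted (PySem.Dict.ofList processed_map).items (fun item => item.2) false)).items

-- ===== PORT B =====
def pvRules : List (List String × List String) :=
  [(["DNSH", "safeguards"], ["Y", "N", "N/A", "S", "n/a"]),
   (["SCC", "proportion"], ["%"]),
   (["business"], ["number"]),
   (["code"], ["code"])]

-- B's rule-table classification over the set of name parts
def pvClassifyB (col : String) : Option String × Option (List String) :=
  let parts : PySem.Set String := PySem.Set.ofList ((PySem.Str.split? col "_").getD [])
  match pvRules.find? (fun r => !(PySem.Set.inter (PySem.Set.ofList r.1) parts).isEmpty) with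
  | some r => (some col, some r.2)
  | none => (some col, none)

-- B's single pass: best = matching entry with lexicographically smallest threshold so far
def pvLoopB (value : Int) : List (String × List Int) → Option (String × List Int) → Option String × Option (List String)
  | [], best =>
    match best with
    | none => (none, none)
    | some b => pvClassifyB b.1
  | (col, threshold) :: rest, best =>
    match PySem.List.pyGet? threshold 0 with
    | none => (none, none)  -- threshold[0] raises IndexError in Python: outside Pre_
    | some t0 =>
      if t0 ≤ value then
        match PySem.List.pyGet? threshold 1 with
        | none => (none, none)  -- threshold[1] raises IndexError in Python: outside Pre_
        | some t1 =>
          if value ≤ t1 then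
            pvLoopB value rest
              (match best with
               | none => some (col, threshold)
               | some b => if threshold < b.2 then some (col, threshold) else some b)
          else pvLoopB value rest best
      else pvLoopB value rest best

def get_column_name_type_using_xcoord_alt (value : Int) (processed_map : List (String × List Int)) : Option String × Option (List String) :=
  pvLoopB value (PySem.Dict.ofList processed_map).items none

-- ===== PRECONDITION & SPEC =====
-- Pre_ excludes maps containing a threshold list that is empty, or a singleton [a] with a ≤ value:
-- indexing threshold[1] (or threshold[0] on []) raises IndexError there in one or both programs.
def Pre_get_column_name_type_using_xcoord (value : Int) (processed_map : List (String × List Int)) : Prop :=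
  ∀ p ∈ processed_map, p.2 ≠ [] ∧ (p.2.length = 1 → value < p.2.headI)
instance (value : Int) (processed_map : List (String × List Int)) : Decidable (Pre_get_column_name_type_using_xcoord value processed_map) := by unfold Pre_get_column_name_type_using_xcoord; infer_instance

def pvWitness_get_column_name_type_using_xcoord : Int × (List (String × List Int)) :=
  (7, [("col_code", [5, 10]), ("col_business", [11, 20])])

def Spec_get_column_name_type_using_xcoord (value : Int) (processed_map : List (String × List Int)) (out : Option String × Option (List String)) : Prop := out = get_column_name_type_using_xcoord_alt value processed_map
instance (value : Int) (processed_map : List (String × List Int)) (out : Option String × Option (List String)) : Decidable (Spec_get_column_name_type_using_xcoord value processed_map out) := by unfold Spec_get_column_name_type_using_xcoord; infer_instance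

-- ===== CLAIM (what is proved, stated in full; the proofs are below) =====
def Claim_equal_get_column_name_type_using_xcoord : Prop := ∀ (value : Int) (processed_map : List (String × List Int)), Dom_get_column_name_type_using_xcoord value processed_map → Pre_get_column_name_type_using_xcoord value processed_map → Spec_get_column_name_type_using_xcoord value processed_map (get_column_name_type_using_xcoord value processed_map)

-- ===== LEMMAS AND PROOFS =====

-- shape of a threshold entry admitted by Pre_
def pvShape (value : Int) (p : String × List Int) : Prop :=
  p.2 ≠ [] ∧ (p.2.length = 1 → value < p.2.headI)

-- 'threshold[0] <= value <= threshold[1]' on a shaped entry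
def pvMatch (value : Int) (p : String × List Int) : Bool :=
  match p.2 with
  | t0 :: t1 :: _ => decide (t0 ≤ value ∧ value ≤ t1)
  | _ => false

-- B's accumulator step
def pvStep (value : Int) (best : Option (String × List Int)) (p : String × List Int) : Option (String × List Int) :=
  if pvMatch value p then
    match best with
    | none => some p
    | some b => if p.2 < b.2 then some p else some b
  else best

lemma pv_mem_items_ofList {p : String × List Int} :
    ∀ pm : List (String × List Int), p ∈ (PySem.Dict.ofList pm).items → p ∈ pm := by
  intro pm
  induction pm using List.reverseRecOn with
  | nil => intro h; simp [PySem.Dict.ofList, PySem.Dict.update, PySem.Dict.empty] at h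
  | append_singleton xs x ih =>
    intro hmem
    have hof : PySem.Dict.ofList (xs ++ [x]) = (PySem.Dict.ofList xs).insert x.1 x.2 := by
      simp [PySem.Dict.ofList, PySem.Dict.update, List.foldl_append]
    rw [hof] at hmem
    rcases (PySem.Dict.mem_items_insert _ _ _ _).1 hmem with h | ⟨h, _⟩
    · simp [h]
    · exact List.mem_append_left _ (ih h)

lemma pv_find_insertBy (q : String × List Int → Bool)
    (before : String × List Int → String × List Int → Bool)
    (hbef : ∀ a b, before a b = true ↔ a.2 < b.2) (x : String × List Int)
    (s : List (String × List Int)) (hs : s.Pairwise fun a b => a.2 ≤ b.2) :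
    (PySem.List.insertBy before x s).find? q =
      match s.find? q with
      | none => if q x then some x else none
      | some m => if q x && before x m then some x else some m := by
  induction s with
  | nil => by_cases hq : q x <;> simp [PySem.List.insertBy, List.find?, hq]
  | cons y ys ih =>
    obtain ⟨hy, hys⟩ := List.pairwise_cons.1 hs
    by_cases hxy : x.2 < y.2
    · have hb : before x y = true := (hbef x y).2 hxy
      rw [show PySem.List.insertBy before x (y :: ys) = x :: y :: ys by
        simp [PySem.List.insertBy, hb]]
      by_cases hq : q x
      · cases hfind : (y :: ys).find? q with
        | none => simp [hq]
        | some m =>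
          have hm : m ∈ y :: ys := List.mem_of_find?_eq_some hfind
          have hxm : x.2 < m.2 := by
            rcases List.mem_cons.1 hm with rfl | hm'
            · exact hxy
            · exact lt_of_lt_of_le hxy (hy _ hm')
          simp [hq, (hbef x m).2 hxm]
      · simp only [List.find?_cons, hq, Bool.false_eq_true, if_false]
        cases hfind : (y :: ys).find? q <;> simp [List.find?_cons] at hfind ⊢ <;> simp [hfind]
    · have hb : before x y = false := by
        rw [← Bool.not_eq_true, hbef]; exact hxy
      rw [show PySem.List.insertBy before x (y :: ys) = y :: PySem.List.insertBy before x ys by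
        simp [PySem.List.insertBy, hb]]
      by_cases hqy : q y
      · simp [hqy, hb]
      · rw [List.find?_cons, List.find?_cons, ih hys]
        simp [hqy]

lemma pv_sorted_find_eq_foldl (value : Int) (l : List (String × List Int)) :
    (PySem.List.sorted l (fun item => item.2) false).find? (pvMatch value) =
      l.foldl (pvStep value) none := by
  induction l using List.reverseRecOn with
  | nil => rfl
  | append_singleton xs x ih =>
    have hsorted : PySem.List.sorted (xs ++ [x]) (fun item => item.2) false
        = PySem.List.insertBy (fun a b => decide (a.2 < b.2)) x
            (PySem.List.sorted xs (fun item => item.2) false) := by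
      rw [PySem.List.sorted_eq_foldl_insertBy, PySem.List.sorted_eq_foldl_insertBy,
        List.foldl_append, List.foldl_cons, List.foldl_nil]
    have hpw : (PySem.List.sorted xs (fun item => item.2) false).Pairwise
        (fun a b => a.2 ≤ b.2) := by
      have h := PySem.List.sorted_pairwise xs (fun item : String × List Int => item.2)
      have hS : @PySem.List.sorted _ _ List.instLinearOrder.toLT LinearOrder.toDecidableLT
          xs (fun item => item.2) false = PySem.List.sorted xs (fun item => item.2) false := by
        congr 1
      rwa [hS] at h
    rw [List.foldl_append, List.foldl_cons, List.foldl_nil, hsorted]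
    refine (pv_find_insertBy (pvMatch value) _ (fun a b => by simp) x _ hpw).trans ?_
    rw [ih]
    cases hfold : xs.foldl (pvStep value) none with
    | none => simp [pvStep]
    | some b => by_cases hq : pvMatch value x <;> by_cases hlt : x.2 < b.2 <;> simp [pvStep, hq, hlt]

lemma pv_loopA_eq (value : Int) :
    ∀ l : List (String × List Int), (∀ p ∈ l, pvShape value p) →
      pvLoopA value l =
        match l.find? (pvMatch value) with
        | some p => pvClassifyA p.1
        | none => (none, none) := by
  intro l
  induction l with
  | nil => intro _; rfl
  | cons p rest ih =>
    intro h
    obtain ⟨hne, h1⟩ := h p (List.mem_cons_self)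
    have hrest : ∀ q ∈ rest, pvShape value q := fun q hq => h q (List.mem_cons_of_mem _ hq)
    obtain ⟨col, t⟩ := p
    rcases t with _ | ⟨t0, _ | ⟨t1, ts⟩⟩
    · exact absurd rfl hne
    · have hav : value < t0 := h1 (by simp)
      simp [pvLoopA, pvMatch, List.find?, pysem, not_le.2 hav, ih hrest]
    · by_cases h0 : t0 ≤ value <;> by_cases hv : value ≤ t1 <;>
        simp [pvLoopA, pvMatch, List.find?, pysem, h0, hv, ih hrest]

lemma pv_loopB_eq (value : Int) :
    ∀ (l : List (String × List Int)) (best : Option (String × List Int)),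
      (∀ p ∈ l, pvShape value p) →
      pvLoopB value l best =
        match l.foldl (pvStep value) best with
        | some b => pvClassifyB b.1
        | none => (none, none) := by
  intro l
  induction l with
  | nil => intro best _; cases best <;> rfl
  | cons p rest ih =>
    intro best h
    obtain ⟨hne, h1⟩ := h p (List.mem_cons_self)
    have hrest : ∀ q ∈ rest, pvShape value q := fun q hq => h q (List.mem_cons_of_mem _ hq)
    obtain ⟨col, t⟩ := p
    rcases t with _ | ⟨t0, _ | ⟨t1, ts⟩⟩
    · exact absurd rfl hne
    · have hav : value < t0 := h1 (by simp)
      have g0 : PySem.List.pyGet? [t0] 0 = some t0 := by simp [pysem]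
      have hstep : pvStep value best (col, [t0]) = best := by simp [pvStep, pvMatch]
      rw [List.foldl_cons, hstep, ← ih best hrest]
      simp only [pvLoopB, g0, if_neg (not_le.2 hav)]
    · have g0 : PySem.List.pyGet? (t0 :: t1 :: ts) 0 = some t0 := by simp [pysem]
      have g1 : PySem.List.pyGet? (t0 :: t1 :: ts) 1 = some t1 := by simp [pysem]
      by_cases h0 : t0 ≤ value <;> by_cases hv : value ≤ t1 <;>
        [skip; skip; skip; skip] <;>
        · have hstep : pvStep value best (col, t0 :: t1 :: ts) =
              (if pvMatch value (col, t0 :: t1 :: ts) then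
                match best with
                | none => some (col, t0 :: t1 :: ts)
                | some b => if (t0 :: t1 :: ts) < b.2 then some (col, t0 :: t1 :: ts) else some b
              else best) := rfl
          rw [List.foldl_cons, ← ih _ hrest]
          simp only [pvLoopB, g0, g1, h0, hv, if_false, pvStep, pvMatch, decide_eq_true_eq]
          simp

lemma pv_classify_eq (col : String) : pvClassifyA col = pvClassifyB col := by
  unfold pvClassifyA pvClassifyB pvRules
  set cs := (PySem.Str.split? col "_").getD [] with hcs
  have hc : ∀ y : String, (PySem.Set.ofList cs).contains y = cs.contains y := by
    intro y; simp [PySem.Set.mem_ofList]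
  simp only [List.find?, PySem.Set.inter, hc]
  by_cases h1 : cs.contains "DNSH" <;> by_cases h2 : cs.contains "safeguards" <;>
    by_cases h3 : cs.contains "SCC" <;> by_cases h4 : cs.contains "proportion" <;>
    by_cases h5 : cs.contains "business" <;> by_cases h6 : cs.contains "code" <;>
    simp_all [PySem.Set.ofList, PySem.Set.add]

lemma pv_items_ofList_sorted (s : List (String × List Int))
    (hnd : (s.map Prod.fst).Nodup) :
    (PySem.Dict.ofList s).items = s := by
  have h := PySem.Dict.items_foldl_insert_fresh s Prod.fst Prod.snd PySem.Dict.empty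
    (fun a _ => PySem.Dict.contains_empty a.1) hnd
  simpa [PySem.Dict.ofList, PySem.Dict.update, PySem.Dict.empty] using h

-- ===== VERDICT (by name: the statement is the Claim_ definition above) =====
theorem get_column_name_type_using_xcoord_spec : Claim_equal_get_column_name_type_using_xcoord := by
  intro value pm _ hpre
  unfold Spec_get_column_name_type_using_xcoord
  unfold get_column_name_type_using_xcoord get_column_name_type_using_xcoord_alt
  have hshape_items : ∀ p ∈ (PySem.Dict.ofList pm).items, pvShape value p :=
    fun p hp => hpre p (pv_mem_items_ofList pm hp)
  have hperm := PySem.List.sorted_perm (PySem.Dict.ofList pm).items (fun item => item.2) false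
  have hnodup : ((PySem.List.sorted (PySem.Dict.ofList pm).items (fun item => item.2) false).map
      Prod.fst).Nodup := by
    have h1 : ((PySem.Dict.ofList pm).items.map Prod.fst).Nodup := by
      have h2 := PySem.Dict.nodup_keys_ofList (κ := String) (ν := List Int) pm
      simpa [PySem.Dict.keys] using h2
    exact ((hperm.map Prod.fst).nodup_iff).2 h1
  rw [pv_items_ofList_sorted _ hnodup]
  have hshape_s : ∀ p ∈ PySem.List.sorted (PySem.Dict.ofList pm).items (fun item => item.2) false,
      pvShape value p := fun p hp => hshape_items p (hperm.mem_iff.1 hp)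
  rw [pv_loopA_eq value _ hshape_s, pv_loopB_eq value _ none hshape_items,
    pv_sorted_find_eq_foldl value]
  cases (PySem.Dict.ofList pm).items.foldl (pvStep value) none <;> simp [pv_classify_eq]
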